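-- pv_equiv track=rewrite | github.com/ccs21/monochrome_Mobius | merge_ko_from_old.py | build_old_map
-- ===== SOURCE A (Python) =====
-- from collections import defaultdict
--
-- KEY_COLS = ("scenario_dir", "Label", "CharacterName", "ja")
--
-- KO_COL = "ko"
--
-- def norm(s: str) -> str:
--     return "" if s is None else s
--
-- def build_old_map(old_rows):
--     best_ko_by_key = {}
--     dup_info = defaultdict(set)
--     for r in old_rows:
--         key = tuple(norm(r.get(c, "")) for c in KEY_COLS)
--         ko = norm(r.get(KO_COL, ""))
--         if ko:
--             dup_info[key].add(ko)
--             if key not in best_ko_by_key: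
--                 best_ko_by_key[key] = ko
--     return best_ko_by_key, dup_info
-- ===== SOURCE B (Python) =====
-- from collections import defaultdict
--
-- KEY_COLS = ("scenario_dir", "Label", "CharacterName", "ja")
--
-- KO_COL = "ko"
--
-- def norm(s: str) -> str:
--     return "" if s is None else s
--
-- def build_old_map(old_rows):
--     # Flatten once to (key, ko) pairs, keep only truthy ko.
--     pairs = [(tuple(norm(r.get(c, "")) for c in KEY_COLS), norm(r.get(KO_COL, "")))
--              for r in old_rows]
--     pairs = [(k, ko) for k, ko in pairs if ko]
--     # Distinct keys in first-appearance order (plain list, no hashing).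
--     keys = []
--     for k, _ in pairs:
--         if k not in keys:
--             keys.append(k)
--     # For each key, rescan the pairs list to collect its ko values.
--     best_ko_by_key = {}
--     dup_info = defaultdict(set)
--     for k in keys:
--         kos = [ko for p, ko in pairs if p == k]
--         best_ko_by_key[k] = kos[0]
--         dup_info[k] = set(kos)
--     return best_ko_by_key, dup_info
-- ===== Notes on version B (the rewrite author's own statement) =====
-- stated objective: alternative
-- what changed: Replaces A's single dict-maintaining pass by a staged brute-force shape: flatten rows to a filtered (key, ko) pair list, collect the distinct keys in first-appearance order with a plain list, then for each key rescan the pair list to get its first ko and ko-set; no grouping dict is maintained at all.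
import Mathlib
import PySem

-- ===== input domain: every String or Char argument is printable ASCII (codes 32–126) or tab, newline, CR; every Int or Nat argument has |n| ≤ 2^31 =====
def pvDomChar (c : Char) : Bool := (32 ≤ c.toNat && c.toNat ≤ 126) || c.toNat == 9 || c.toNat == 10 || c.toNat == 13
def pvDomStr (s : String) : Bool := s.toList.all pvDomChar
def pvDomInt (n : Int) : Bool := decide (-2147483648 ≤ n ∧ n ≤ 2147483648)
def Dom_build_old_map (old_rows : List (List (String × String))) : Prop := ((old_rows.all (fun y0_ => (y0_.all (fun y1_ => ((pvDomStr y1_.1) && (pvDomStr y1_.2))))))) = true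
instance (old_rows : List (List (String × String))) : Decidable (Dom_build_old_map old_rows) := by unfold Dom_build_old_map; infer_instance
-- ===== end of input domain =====

-- B replaces A's single dict-maintaining pass by staged passes: a filtered (key, ko) pair list,
-- the distinct keys in first-appearance order, then a per-key rescan of the pair list
-- (objective: alternative decomposition, no grouping dict maintained).

-- shared helpers (both Pythons compute key and ko identically)
def pvKeyCols : List String := ["scenario_dir", "Label", "CharacterName", "ja"]

-- norm(r.get(c, "")) — values are always str here, so norm is the identity
def pvKeyOf (r : List (String × String)) : List String :=
  pvKeyCols.map (fun c => (PySem.Dict.mk r).getD c "")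

def pvKoOf (r : List (String × String)) : String :=
  (PySem.Dict.mk r).getD "ko" ""

-- ===== PORT A =====
def build_old_map (old_rows : List (List (String × String))) : (List (List String × String)) × (List (List String × List String)) :=
  let st := old_rows.foldl
    (fun (st : PySem.Dict (List String) String × PySem.Dict (List String) (PySem.Set String)) r =>
      let key := pvKeyOf r
      let ko := pvKoOf r
      if ko ≠ "" then
        -- dup_info[key].add(ko)  (defaultdict(set))
        let dup := st.2.modify key PySem.Set.empty (fun s => PySem.Set.add s ko)
        -- if key not in best_ko_by_key: best_ko_by_key[key] = ko
        let best := if st.1.contains key then st.1 else st.1.insert key ko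
        (best, dup)
      else st)
    (PySem.Dict.empty, PySem.Dict.empty)
  (st.1.items, st.2.items)

-- ===== PORT B =====
-- B-side helpers (the three stages of Source B)
def pvPairsOf (old_rows : List (List (String × String))) : List (List String × String) :=
  (old_rows.map (fun r => (pvKeyOf r, pvKoOf r))).filter (fun p => p.2 ≠ "")

def pvFK (pairs : List (List String × String)) : List (List String) :=
  pairs.foldl (fun ks p => if ks.contains p.1 then ks else ks ++ [p.1]) []

def pvGrp (pairs : List (List String × String)) (k : List String) : List String :=
  (pairs.filter (fun p => p.1 == k)).map Prod.snd

def build_old_map_alt (old_rows : List (List (String × String))) : (List (List String × String)) × (List (List String × List String)) :=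
  let pairs := pvPairsOf old_rows
  let keys := pvFK pairs
  -- final loop: kos = [ko for p, ko in pairs if p == k]; kos[0] is ported as headD ""
  -- (exact here: every k in keys has at least one pair, so the list is never empty)
  keys.foldl
    (fun (st : (List (List String × String)) × (List (List String × List String))) k =>
      let kos := pvGrp pairs k
      (st.1 ++ [(k, kos.headD "")], st.2 ++ [(k, PySem.Set.ofList kos)]))
    ([], [])

-- ===== PRECONDITION & SPEC =====
def Spec_build_old_map (old_rows : List (List (String × String))) (out : (List (List String × String)) × (List (List String × List String))) : Prop := out = build_old_map_alt old_rows
instance (old_rows : List (List (String × String))) (out : (List (List String × String)) × (List (List String × List String))) : Decidable (Spec_build_old_map old_rows out) := by unfold Spec_build_old_map; infer_instance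

-- ===== CLAIM (what is proved, stated in full; the proofs are below) =====
def Claim_equal_build_old_map : Prop := ∀ (old_rows : List (List (String × String))), Dom_build_old_map old_rows → Spec_build_old_map old_rows (build_old_map old_rows)

-- ===== LEMMAS AND PROOFS =====

-- the grouping dict A's fold is invariantly tied to
def pvG (pairs : List (List String × String)) : PySem.Dict (List String) (List String) :=
  pairs.foldl (fun g p => g.modify p.1 [] (fun l => l ++ [p.2])) PySem.Dict.empty

-- the invariant tying A's two dicts to the grouping dict
def pvInv (b : PySem.Dict (List String) String)
    (d : PySem.Dict (List String) (PySem.Set String))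
    (g : PySem.Dict (List String) (List String)) : Prop :=
  b.items = g.items.map (fun p => (p.1, p.2.headD "")) ∧
  d.items = g.items.map (fun p => (p.1, PySem.Set.ofList p.2)) ∧
  (∀ p ∈ g.items, p.2 ≠ []) ∧
  g.keys.Nodup

theorem pvInv_empty : pvInv PySem.Dict.empty PySem.Dict.empty PySem.Dict.empty := by
  refine ⟨rfl, rfl, by simp [PySem.Dict.empty], by simp [PySem.Dict.empty, PySem.Dict.keys]⟩

theorem pvContains_congr {ν ν' : Type} (g : PySem.Dict (List String) ν)
    (d : PySem.Dict (List String) ν') (f : List String × ν → ν')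
    (h : d.items = g.items.map (fun p => (p.1, f p))) (k : List String) :
    d.contains k = g.contains k := by
  simp [PySem.Dict.contains, h, List.any_map, Function.comp_def]

theorem pvInv_step (b : PySem.Dict (List String) String)
    (d : PySem.Dict (List String) (PySem.Set String))
    (g : PySem.Dict (List String) (List String)) (key : List String) (ko : String)
    (hinv : pvInv b d g) :
    pvInv (if b.contains key then b else b.insert key ko)
      (d.modify key PySem.Set.empty (fun s => PySem.Set.add s ko))
      (g.modify key [] (fun l => l ++ [ko])) := by
  obtain ⟨hb, hd, hne, hnd⟩ := hinv
  have hcb : b.contains key = g.contains key :=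
    pvContains_congr g b (fun p => p.2.headD "") hb key
  have hcd : d.contains key = g.contains key :=
    pvContains_congr g d (fun p => PySem.Set.ofList p.2) hd key
  have hkeysd : d.keys = g.keys := by
    simp [PySem.Dict.keys, hd, List.map_map, Function.comp]
  by_cases hc : g.contains key = true
  · -- existing key: every item with this key gets its list extended
    have hex : ∃ v, (key, v) ∈ g.items := by
      have hc2 := hc
      simp only [PySem.Dict.contains, List.any_eq_true] at hc2
      obtain ⟨⟨a, w⟩, hp, hpk⟩ := hc2
      have ha : a = key := by simpa using hpk
      exact ⟨w, ha ▸ hp⟩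
    obtain ⟨v, hv⟩ := hex
    have hgetg : g.getD key [] = v := PySem.Dict.getD_of_mem_items g hv hnd []
    have hvne : v ≠ [] := hne _ hv
    have hgetd : d.getD key PySem.Set.empty = PySem.Set.ofList v := by
      have : (key, PySem.Set.ofList v) ∈ d.items := by
        rw [hd]; exact List.mem_map.mpr ⟨(key, v), hv, rfl⟩
      exact PySem.Dict.getD_of_mem_items d this (by rw [hkeysd]; exact hnd) _
    have hgi : (g.modify key [] (fun l => l ++ [ko])).items =
        g.items.map (fun p => if p.1 == key then (key, v ++ [ko]) else p) := by
      simp [PySem.Dict.modify, PySem.Dict.items_insert, hc, hgetg]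
    constructor
    · have hbt : b.contains key = true := by rw [hcb]; exact hc
      rw [if_pos hbt, hb, hgi, List.map_map]
      apply List.map_congr_left
      intro p hp
      by_cases hpk : p.1 == key
      · have hp1 : p.1 = key := beq_iff_eq.mp hpk
        have hpv : p.2 = v := by
          have h1 : (p.1, p.2) ∈ g.items := hp
          rw [hp1] at h1
          have := PySem.Dict.getD_of_mem_items g h1 hnd []
          rw [hgetg] at this; exact this.symm
        simp only [Function.comp, hp1, hpv, beq_self_eq_true, if_true]
        cases v with
        | nil => exact absurd rfl hvne
        | cons a t => simp
      · simp [Function.comp, hpk]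
    refine ⟨?_, ?_, ?_⟩
    · have hdins : (d.modify key PySem.Set.empty (fun s => PySem.Set.add s ko)).items =
          d.items.map (fun p => if p.1 == key then (key, PySem.Set.add (PySem.Set.ofList v) ko) else p) := by
        simp only [PySem.Dict.modify, PySem.Dict.items_insert, hcd, hc, if_true]
        rw [hgetd]
      rw [hdins, hd, hgi, List.map_map, List.map_map]
      apply List.map_congr_left
      intro p hp
      by_cases hpk : p.1 == key
      · have hp1 : p.1 = key := beq_iff_eq.mp hpk
        have hpv : p.2 = v := by
          have h1 : (p.1, p.2) ∈ g.items := hp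
          rw [hp1] at h1
          have := PySem.Dict.getD_of_mem_items g h1 hnd []
          rw [hgetg] at this; exact this.symm
        simp [Function.comp, hp1, PySem.Set.ofList, List.foldl_append]
      · simp [Function.comp, hpk]
    · intro p hp
      rw [hgi] at hp
      obtain ⟨q, hq, hqe⟩ := List.mem_map.mp hp
      by_cases hqk : q.1 == key
      · simp [hqk] at hqe; rw [← hqe]; simp
      · simp [hqk] at hqe; rw [← hqe]; exact hne q hq
    · have : (g.modify key [] (fun l => l ++ [ko])).keys = g.keys := by
        simp only [PySem.Dict.keys, hgi, List.map_map]
        apply List.map_congr_left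
        intro p hp
        by_cases hpk : p.1 == key
        · simp [Function.comp, beq_iff_eq.mp hpk]
        · simp [Function.comp, hpk]
      rw [this]; exact hnd
  · -- fresh key: everything appends
    have hc' : g.contains key = false := by simpa using hc
    have hgetg : g.getD key [] = [] :=
      PySem.Dict.getD_of_not_contains g [] hc'
    have hgetd : d.getD key PySem.Set.empty = PySem.Set.empty :=
      PySem.Dict.getD_of_not_contains d PySem.Set.empty (by rw [hcd]; exact hc')
    have hgi : (g.modify key [] (fun l => l ++ [ko])).items = g.items ++ [(key, [ko])] := by
      simp [PySem.Dict.modify, PySem.Dict.items_insert, hc', hgetg]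
    constructor
    · rw [hcb, hc']; simp only [Bool.false_eq_true, if_false]
      have : (b.insert key ko).items = b.items ++ [(key, ko)] := by
        simp [PySem.Dict.items_insert, hcb, hc']
      rw [this, hb, hgi]; simp
    refine ⟨?_, ?_, ?_⟩
    · have : (d.modify key PySem.Set.empty (fun s => PySem.Set.add s ko)).items =
          d.items ++ [(key, PySem.Set.add PySem.Set.empty ko)] := by
        simp only [PySem.Dict.modify, PySem.Dict.items_insert, hcd, hc', Bool.false_eq_true,
          if_false]
        rw [hgetd]
      rw [this, hd, hgi]
      simp [PySem.Set.add, PySem.Set.empty, PySem.Set.ofList]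
    · intro p hp
      rw [hgi] at hp
      rcases List.mem_append.mp hp with h | h
      · exact hne p h
      · rw [List.mem_singleton] at h
        subst h
        simp
    · have hk : (g.modify key [] (fun l => l ++ [ko])).keys = g.keys ++ [key] := by
        simp [PySem.Dict.keys, hgi]
      rw [hk]
      refine List.Nodup.append hnd (List.nodup_singleton key) ?_
      intro x hx hx2
      simp at hx2
      subst hx2
      have : g.contains x = true := by
        simp only [PySem.Dict.keys, List.mem_map] at hx
        obtain ⟨⟨a, w⟩, hp, hp1⟩ := hx
        simp only [PySem.Dict.contains, List.any_eq_true]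
        exact ⟨(a, w), hp, by simpa using hp1⟩
      rw [this] at hc'; exact absurd hc' (by simp)

-- A's fold invariant over any list of rows, against the grouping fold over the same rows
theorem pvFold_inv (rows : List (List (String × String)))
    (b : PySem.Dict (List String) String)
    (d : PySem.Dict (List String) (PySem.Set String))
    (g : PySem.Dict (List String) (List String)) (hinv : pvInv b d g) :
    pvInv
      (rows.foldl
        (fun (st : PySem.Dict (List String) String × PySem.Dict (List String) (PySem.Set String)) r =>
          let key := pvKeyOf r
          let ko := pvKoOf r
          if ko ≠ "" then
            let dup := st.2.modify key PySem.Set.empty (fun s => PySem.Set.add s ko)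
            let best := if st.1.contains key then st.1 else st.1.insert key ko
            (best, dup)
          else st) (b, d)).1
      (rows.foldl
        (fun (st : PySem.Dict (List String) String × PySem.Dict (List String) (PySem.Set String)) r =>
          let key := pvKeyOf r
          let ko := pvKoOf r
          if ko ≠ "" then
            let dup := st.2.modify key PySem.Set.empty (fun s => PySem.Set.add s ko)
            let best := if st.1.contains key then st.1 else st.1.insert key ko
            (best, dup)
          else st) (b, d)).2
      (rows.foldl
        (fun (g : PySem.Dict (List String) (List String)) r =>
          let key := pvKeyOf r
          let ko := pvKoOf r
          if ko ≠ "" then g.modify key [] (fun l => l ++ [ko]) else g) g) := by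
  induction rows generalizing b d g with
  | nil => exact hinv
  | cons r rest ih =>
    simp only [List.foldl_cons]
    by_cases hko : pvKoOf r ≠ ""
    · simp only [if_pos hko]
      exact ih _ _ _ (pvInv_step b d g (pvKeyOf r) (pvKoOf r) hinv)
    · simp only [if_neg hko]
      exact ih _ _ _ hinv

-- the grouping fold over rows (with the ko ≠ "" skip) is the grouping fold over the filtered pairs
theorem pvRows_to_pairs (rows : List (List (String × String)))
    (g : PySem.Dict (List String) (List String)) :
    rows.foldl
      (fun (g : PySem.Dict (List String) (List String)) r =>
        let key := pvKeyOf r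
        let ko := pvKoOf r
        if ko ≠ "" then g.modify key [] (fun l => l ++ [ko]) else g) g =
    (pvPairsOf rows).foldl (fun g p => g.modify p.1 [] (fun l => l ++ [p.2])) g := by
  induction rows generalizing g with
  | nil => rfl
  | cons r rest ih =>
    simp only [pvPairsOf, List.map_cons, List.filter_cons, List.foldl_cons]
    by_cases hko : pvKoOf r ≠ ""
    · rw [if_pos hko, show (decide (pvKoOf r ≠ "")) = true from decide_eq_true hko]
      simp only [if_true, List.foldl_cons]
      exact ih _
    · rw [if_neg hko, show (decide (pvKoOf r ≠ "")) = false by simpa using hko]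
      simp only [Bool.false_eq_true, if_false]
      exact ih _

-- B's keys loop is the set-of-first-appearances of the pair keys
theorem pvFK_eq_ofList (ps : List (List String × String)) :
    pvFK ps = PySem.Set.ofList (ps.map Prod.fst) := by
  have hstep : ∀ (ks : List (List String)),
      ps.foldl (fun ks p => if ks.contains p.1 then ks else ks ++ [p.1]) ks =
      ps.foldl (fun s p => PySem.Set.add s p.1) ks := by
    induction ps with
    | nil => intro ks; rfl
    | cons p rest ih =>
      intro ks
      simp only [List.foldl_cons]
      rw [PySem.Set.add_eq_ite]
      by_cases hm : p.1 ∈ ks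
      · rw [if_pos hm, if_pos (by simpa using hm)]
        exact ih ks
      · rw [if_neg hm, if_neg (by simpa using hm)]
        exact ih (ks ++ [p.1])
  unfold pvFK
  rw [hstep, ← PySem.Set.update_map_eq_foldl_add, PySem.Set.update_nil_left]

-- the grouping dict's keys are the same set
theorem pvG_keys (ps : List (List String × String)) :
    (pvG ps).keys = pvFK ps := by
  rw [pvFK_eq_ofList]
  unfold pvG
  rw [PySem.Dict.keys_foldl_modify_key ps Prod.fst [] (fun d p => fun l => l ++ [p.2])
        PySem.Dict.empty]
  simp [PySem.Set.update_nil_left]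

theorem pvG_keys_nodup (ps : List (List String × String)) :
    (pvG ps).keys.Nodup := by
  rw [pvG_keys, pvFK_eq_ofList]
  exact PySem.Set.nodup_ofList _

-- the grouping dict's lookups are the per-key rescans
theorem pvG_getD (ps : List (List String × String)) (k : List String) :
    (pvG ps).getD k [] = pvGrp ps k := by
  unfold pvG pvGrp
  rw [PySem.Dict.getD_foldl_modify_append]
  simp

-- the main characterisation: the grouping dict's items are the first-appearance keys
-- paired with the per-key rescans
theorem pvG_items (ps : List (List String × String)) :
    (pvG ps).items = (pvFK ps).map (fun k => (k, pvGrp ps k)) := by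
  have hmapself : (pvG ps).items.map (fun p => (p.1, (pvG ps).getD p.1 [])) = (pvG ps).items := by
    have h1 : (pvG ps).items.map (fun p => (p.1, (pvG ps).getD p.1 [])) = (pvG ps).items.map id := by
      apply List.map_congr_left
      intro p hp
      have := PySem.Dict.getD_of_mem_items (pvG ps) (k := p.1) (v := p.2)
        (by exact hp) (pvG_keys_nodup ps) []
      simp [this]
    rw [h1, List.map_id]
  calc (pvG ps).items = (pvG ps).items.map (fun p => (p.1, (pvG ps).getD p.1 [])) := hmapself.symm
    _ = ((pvG ps).items.map Prod.fst).map (fun k => (k, (pvG ps).getD k [])) := by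
        rw [List.map_map]
        rfl
    _ = (pvFK ps).map (fun k => (k, (pvG ps).getD k [])) := by
        rw [show (pvG ps).items.map Prod.fst = (pvG ps).keys from rfl, pvG_keys]
    _ = (pvFK ps).map (fun k => (k, pvGrp ps k)) := by
        apply List.map_congr_left
        intro k _
        rw [pvG_getD]

-- B's final loop builds the two maps by appending
theorem pvB_fold (pairs : List (List String × String)) (ks : List (List String))
    (l1 : List (List String × String)) (l2 : List (List String × PySem.Set String)) :
    ks.foldl
      (fun (st : (List (List String × String)) × (List (List String × List String))) k =>
        let kos := pvGrp pairs k
        (st.1 ++ [(k, kos.headD "")], st.2 ++ [(k, PySem.Set.ofList kos)]))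
      (l1, l2) =
    (l1 ++ ks.map (fun k => (k, (pvGrp pairs k).headD "")),
     l2 ++ ks.map (fun k => (k, PySem.Set.ofList (pvGrp pairs k)))) := by
  induction ks generalizing l1 l2 with
  | nil => simp
  | cons k rest ih =>
    simp only [List.foldl_cons, List.map_cons]
    rw [ih]
    simp

-- ===== VERDICT (by name: the statement is the Claim_ definition above) =====
theorem build_old_map_spec : Claim_equal_build_old_map := by
  intro old_rows _
  unfold Spec_build_old_map build_old_map build_old_map_alt
  have h := pvFold_inv old_rows PySem.Dict.empty PySem.Dict.empty PySem.Dict.empty pvInv_empty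
  rw [pvRows_to_pairs] at h
  obtain ⟨hb, hd, _, _⟩ := h
  rw [pvB_fold]
  have hg : (pvG (pvPairsOf old_rows)).items =
      (pvFK (pvPairsOf old_rows)).map (fun k => (k, pvGrp (pvPairsOf old_rows) k)) :=
    pvG_items _
  apply Prod.ext
  · show (_ : PySem.Dict (List String) String).items = _
    rw [hb]
    show (pvG (pvPairsOf old_rows)).items.map _ = _
    rw [hg, List.map_map]
    simp
  · show (_ : PySem.Dict (List String) (PySem.Set String)).items = _
    rw [hd]
    show (pvG (pvPairsOf old_rows)).items.map _ = _
    rw [hg, List.map_map]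
    simp
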